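-- pv_equiv track=rewrite | github.com/catcatAI/Unified-AI-Project | unified_auto_fix_system/modules/syntax_fixer.py | _needs_colon
-- ===== SOURCE A (Python) =====
-- def _needs_colon(line: str) -> bool:
--     """检查是否需要冒号"""
--     stripped = line.strip()
--     if not stripped or stripped.startswith('#'):
--         return False
--
--     # 需要冒号的关键字
--     colon_keywords = ['class', 'def', 'if', 'elif', 'else', 'for', 'while',
--                      'try', 'except', 'finally', 'with']
--
--     # 检查是否以这些关键字开头
--     for keyword in colon_keywords:
--         # 精确匹配关键字后跟空格的情况
--         if stripped.startswith(keyword + ' '):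
--             return not stripped.endswith(':')
--
--         # 完整关键字匹配
--         if stripped == keyword:
--             return True
--
--         # 检查关键字后跟括号的情况（函数/类定义）
--         if (stripped.startswith(keyword + '(') and ')' in stripped and
--             not stripped.endswith(':')):
--             return True
--
--         # 检查with语句等特殊情况
--         if (stripped.startswith(keyword + ' ') and
--             not stripped.endswith(':')):
--             # 检查是否是合法的with语句（包含as关键字）
--             if keyword == 'with' and ' as ' in stripped:
--                 return True
--             # 其他控制流语句
--             if keyword in ['if', 'elif', 'for', 'while', 'except']:
--                 return True
--
--     return False
-- ===== SOURCE B (Python) =====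
-- def _needs_colon(line: str) -> bool:
--     """Check if a code line needs a colon: extract the leading letter run once,
--     then dispatch on the character immediately following it."""
--     stripped = line.strip()
--     if not stripped or stripped.startswith('#'):
--         return False
--     n = len(stripped)
--     i = 0
--     while i < n and stripped[i].isalpha():
--         i += 1
--     if stripped[:i] not in ('class', 'def', 'if', 'elif', 'else', 'for', 'while',
--                             'try', 'except', 'finally', 'with'):
--         return False
--     if i == n:
--         return True
--     ch = stripped[i]
--     if ch == ' ':
--         return not stripped.endswith(':')
--     if ch == '(':
--         return ')' in stripped and not stripped.endswith(':')
--     return False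
-- ===== Notes on version B (the rewrite author's own statement) =====
-- stated objective: simpler
-- what changed: Replaces the 11-keyword loop of four prefix tests each with a single index scan that extracts the leading run of letters, one membership test of that token, and a four-way dispatch on the character immediately following the token.
import Mathlib
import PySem

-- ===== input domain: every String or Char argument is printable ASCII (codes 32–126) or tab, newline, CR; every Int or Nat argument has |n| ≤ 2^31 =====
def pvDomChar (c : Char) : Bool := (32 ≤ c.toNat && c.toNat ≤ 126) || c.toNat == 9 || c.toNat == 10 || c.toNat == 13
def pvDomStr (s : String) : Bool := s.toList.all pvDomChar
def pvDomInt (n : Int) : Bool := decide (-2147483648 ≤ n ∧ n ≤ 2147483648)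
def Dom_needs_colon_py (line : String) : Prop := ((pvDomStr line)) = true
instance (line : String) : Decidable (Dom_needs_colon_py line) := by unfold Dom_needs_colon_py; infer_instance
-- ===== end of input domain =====

-- B replaces A's 11-keyword loop (four prefix tests per keyword) with one index scan that
-- extracts the leading letter run plus a dispatch on the character right after it: simpler.

-- ===== PORT A =====
-- A's keyword list, in order
def pvColonKeywords : List (List Char) :=
  ["class".toList, "def".toList, "if".toList, "elif".toList, "else".toList, "for".toList,
   "while".toList, "try".toList, "except".toList, "finally".toList, "with".toList]

-- A's for-loop over the keywords: each iteration checks its four 'if's in order,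
-- falling through to the next keyword when none returns.
def pvLoopA (s : List Char) : List (List Char) → Bool
  | [] => false
  | k :: ks =>
    if PySem.Chars.startswith s (k ++ [' ']) then !PySem.Chars.endswith s [':']
    else if s = k then true
    else if PySem.Chars.startswith s (k ++ ['(']) && PySem.Chars.isIn [')'] s
            && !PySem.Chars.endswith s [':'] then true
    else if PySem.Chars.startswith s (k ++ [' ']) && !PySem.Chars.endswith s [':'] then
      (if k = "with".toList && PySem.Chars.isIn " as ".toList s then true
       else if k ∈ ["if".toList, "elif".toList, "for".toList, "while".toList, "except".toList] then true
       else pvLoopA s ks)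
    else pvLoopA s ks

def needs_colon_py (line : String) : Bool :=
  let stripped := PySem.Chars.strip line.toList
  if stripped.isEmpty || PySem.Chars.startswith stripped ['#'] then false
  else pvLoopA stripped pvColonKeywords

-- ===== PORT B =====
-- B's while loop: advance i over the leading run of letters
def pvScanAlpha (s : List Char) (i : Nat) : Nat :=
  if h : i < s.length then
    if PySem.Chars.isalpha s[i] then pvScanAlpha s (i + 1) else i
  else i
termination_by s.length - i
decreasing_by omega

def needs_colon_py_alt (line : String) : Bool :=
  let stripped := PySem.Chars.strip line.toList
  if stripped.isEmpty || PySem.Chars.startswith stripped ['#'] then false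
  else
    let i := pvScanAlpha stripped 0
    if stripped.take i ∈ ["class".toList, "def".toList, "if".toList, "elif".toList,
        "else".toList, "for".toList, "while".toList, "try".toList, "except".toList,
        "finally".toList, "with".toList] then
      if i = stripped.length then true
      else
        match stripped[i]? with  -- i < length here, so the none case is unreachable
        | some c =>
          if c = ' ' then !PySem.Chars.endswith stripped [':']
          else if c = '(' then PySem.Chars.isIn [')'] stripped && !PySem.Chars.endswith stripped [':']
          else false
        | none => false
    else false

-- ===== PRECONDITION & SPEC =====
def Spec_needs_colon_py (line : String) (out : Bool) : Prop := out = needs_colon_py_alt line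
instance (line : String) (out : Bool) : Decidable (Spec_needs_colon_py line out) := by unfold Spec_needs_colon_py; infer_instance

-- ===== CLAIM (what is proved, stated in full; the proofs are below) =====
def Claim_equal_needs_colon_py : Prop := ∀ (line : String), Dom_needs_colon_py line → Spec_needs_colon_py line (needs_colon_py line)

-- ===== LEMMAS AND PROOFS =====

-- 'keyword ++ one non-letter delimiter' is a prefix of s iff the leading letter run of s
-- equals the keyword and the next character is that delimiter
theorem pvPrefix_token (k : List Char) (c : Char) (s : List Char)
    (hk : ∀ x ∈ k, PySem.Chars.isalpha x = true) (hc : PySem.Chars.isalpha c = false) :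
    k ++ [c] <+: s ↔
      (s.takeWhile PySem.Chars.isalpha = k ∧ (s.dropWhile PySem.Chars.isalpha).head? = some c) := by
  induction k generalizing s with
  | nil =>
    cases s with
    | nil => simp
    | cons d t =>
      by_cases hd : PySem.Chars.isalpha d = true
      · have hne : d ≠ c := fun h => by rw [h] at hd; simp [hd] at hc
        simp [List.takeWhile_cons, hd, List.cons_prefix_cons, Ne.symm hne]
      · simp [List.takeWhile_cons, List.dropWhile_cons, hd, List.cons_prefix_cons, eq_comm]
  | cons a k' ih =>
    have ha : PySem.Chars.isalpha a = true := hk a (by simp)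
    cases s with
    | nil => simp
    | cons d t =>
      by_cases hd : d = a
      · subst hd
        simp [List.cons_prefix_cons, List.takeWhile_cons, List.dropWhile_cons, ha,
              ih t (fun x hx => hk x (by simp [hx]))]
      · by_cases hda : PySem.Chars.isalpha d = true
        · simp [List.cons_prefix_cons, List.takeWhile_cons, hda, hd, Ne.symm hd]
        · simp [List.cons_prefix_cons, List.takeWhile_cons, hda, Ne.symm hd]

-- s equals a list of letters iff the leading letter run is all of s and equals it
theorem pvEq_token (k s : List Char) (hk : ∀ x ∈ k, PySem.Chars.isalpha x = true) :
    s = k ↔ (s.takeWhile PySem.Chars.isalpha = k ∧ s.dropWhile PySem.Chars.isalpha = []) := by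
  constructor
  · rintro rfl
    exact ⟨List.takeWhile_eq_self_iff.mpr hk, List.dropWhile_eq_nil_iff.mpr fun x hx => hk x hx⟩
  · rintro ⟨h1, h2⟩
    rw [← List.takeWhile_append_dropWhile (p := PySem.Chars.isalpha) (l := s), h1, h2, List.append_nil]

-- what both sides compute once the token is known to be a keyword
def pvDispatch (s : List Char) : Bool :=
  match s.dropWhile PySem.Chars.isalpha with
  | [] => true
  | c :: _ =>
    if c = ' ' then !PySem.Chars.endswith s [':']
    else if c = '(' then PySem.Chars.isIn [')'] s && !PySem.Chars.endswith s [':']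
    else false

-- A's keyword loop is membership of the leading letter run plus the dispatch
theorem pvLoop_eq (s : List Char) (ks : List (List Char))
    (hall : ∀ k ∈ ks, ∀ x ∈ k, PySem.Chars.isalpha x = true) (hnd : ks.Nodup) :
    pvLoopA s ks = if s.takeWhile PySem.Chars.isalpha ∈ ks then pvDispatch s else false := by
  induction ks with
  | nil => simp [pvLoopA]
  | cons k ks ih =>
    have hk : ∀ x ∈ k, PySem.Chars.isalpha x = true := hall k (by simp)
    have hsw1 : PySem.Chars.startswith s (k ++ [' ']) = true ↔
        (s.takeWhile PySem.Chars.isalpha = k ∧ (s.dropWhile PySem.Chars.isalpha).head? = some ' ') := by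
      rw [PySem.Chars.startswith_iff]; exact pvPrefix_token k ' ' s hk (by decide)
    have hsw2 : PySem.Chars.startswith s (k ++ ['(']) = true ↔
        (s.takeWhile PySem.Chars.isalpha = k ∧ (s.dropWhile PySem.Chars.isalpha).head? = some '(') := by
      rw [PySem.Chars.startswith_iff]; exact pvPrefix_token k '(' s hk (by decide)
    have heq : s = k ↔ (s.takeWhile PySem.Chars.isalpha = k ∧ s.dropWhile PySem.Chars.isalpha = []) :=
      pvEq_token k s hk
    have ihr := ih (fun k' hk' => hall k' (by simp [hk'])) hnd.of_cons
    have hknot : k ∉ ks := (List.nodup_cons.mp hnd).1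
    by_cases ht : s.takeWhile PySem.Chars.isalpha = k
    · -- this keyword IS the leading token
      have hmem : s.takeWhile PySem.Chars.isalpha ∈ k :: ks := by simp [ht]
      have h4 : pvLoopA s ks = false := by
        rw [ihr, if_neg]; rw [ht]; exact hknot
      rcases hr : s.dropWhile PySem.Chars.isalpha with _ | ⟨c, r'⟩
      · have h2 : s = k := heq.mpr ⟨ht, hr⟩
        have h1 : PySem.Chars.startswith s (k ++ [' ']) = false := by
          rw [Bool.eq_false_iff]; intro hsw
          have := (hsw1.mp hsw).2; rw [hr] at this; simp at this
        rw [pvLoopA, if_neg (by simp [h1]), if_pos h2, if_pos hmem]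
        simp [pvDispatch, hr]
      · by_cases hc : c = ' '
        · subst hc
          have h1 : PySem.Chars.startswith s (k ++ [' ']) = true :=
            hsw1.mpr ⟨ht, by rw [hr]; rfl⟩
          rw [pvLoopA, if_pos h1, if_pos hmem]
          simp [pvDispatch, hr]
        · have h1 : PySem.Chars.startswith s (k ++ [' ']) = false := by
            rw [Bool.eq_false_iff]; intro hsw
            have := (hsw1.mp hsw).2; rw [hr] at this; simp at this; exact hc this
          have h2 : s ≠ k := by
            intro h
            have := (heq.mp h).2; rw [hr] at this; simp at this
          by_cases hc2 : c = '('
          · subst hc2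
            have h3 : PySem.Chars.startswith s (k ++ ['(']) = true :=
              hsw2.mpr ⟨ht, by rw [hr]; rfl⟩
            rw [pvLoopA, if_neg (by simp [h1]), if_neg h2, if_pos hmem]
            simp only [h3, h1, h4, Bool.true_and, Bool.false_and, Bool.false_eq_true, if_false]
            simp [pvDispatch, hr]
          · have h3 : PySem.Chars.startswith s (k ++ ['(']) = false := by
              rw [Bool.eq_false_iff]; intro hsw
              have := (hsw2.mp hsw).2; rw [hr] at this; simp at this; exact hc2 this
            rw [pvLoopA, if_neg (by simp [h1]), if_neg h2, if_pos hmem]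
            simp [h3, h1, h4, pvDispatch, hr, hc, hc2]
    · -- this keyword is not the token: every branch falls through to the rest of the loop
      have h1 : PySem.Chars.startswith s (k ++ [' ']) = false := by
        rw [Bool.eq_false_iff]; intro hsw; exact ht (hsw1.mp hsw).1
      have h3 : PySem.Chars.startswith s (k ++ ['(']) = false := by
        rw [Bool.eq_false_iff]; intro hsw; exact ht (hsw2.mp hsw).1
      have h2 : s ≠ k := fun h => ht (heq.mp h).1
      rw [pvLoopA, if_neg (by simp [h1]), if_neg h2]
      simp only [h3, h1, Bool.false_and, Bool.false_eq_true, if_false]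
      rw [ihr]
      simp [List.mem_cons, ht]

-- B's scan loop lands right after the leading letter run
theorem pvScanAlpha_eq (s : List Char) (i : Nat) :
    pvScanAlpha s i = i + ((s.drop i).takeWhile PySem.Chars.isalpha).length := by
  fun_induction pvScanAlpha s i with
  | case1 i h ha ih =>
    rw [ih, List.drop_eq_getElem_cons h, List.takeWhile_cons, if_pos ha]
    simp; omega
  | case2 i h ha =>
    rw [List.drop_eq_getElem_cons h, List.takeWhile_cons, if_neg (by simp [ha])]
    simp
  | case3 i h =>
    rw [List.drop_eq_nil_iff.mpr (by omega)]
    simp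

-- ===== VERDICT (by name: the statement is the Claim_ definition above) =====
set_option maxRecDepth 8192 in
theorem needs_colon_py_spec : Claim_equal_needs_colon_py := by
  intro line _
  unfold Spec_needs_colon_py needs_colon_py needs_colon_py_alt
  simp only []
  cases hg : ((PySem.Chars.strip line.toList).isEmpty
      || PySem.Chars.startswith (PySem.Chars.strip line.toList) ['#']) with
  | true => simp [hg]
  | false =>
    simp only [hg, Bool.false_eq_true, if_false]
    have hall : ∀ k ∈ pvColonKeywords, ∀ x ∈ k, PySem.Chars.isalpha x = true := by
      have h : pvColonKeywords.all (fun k => k.all PySem.Chars.isalpha) = true := by decide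
      simpa [List.all_eq_true] using h
    rw [pvLoop_eq _ pvColonKeywords hall (by decide)]
    set s := PySem.Chars.strip line.toList with hs
    set tw := s.takeWhile PySem.Chars.isalpha with htw
    have hscan : pvScanAlpha s 0 = tw.length := by rw [pvScanAlpha_eq]; simp [htw]
    have hpre : tw <+: s := htw ▸ List.takeWhile_prefix _
    have htake : s.take tw.length = tw := (List.prefix_iff_eq_take.mp hpre).symm
    have hsplit : tw ++ s.dropWhile PySem.Chars.isalpha = s := by
      rw [htw]; exact List.takeWhile_append_dropWhile
    simp only [hscan, htake]
    by_cases hm : tw ∈ pvColonKeywords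
    · rw [if_pos hm, if_pos (show tw ∈ _ by simpa [pvColonKeywords] using hm)]
      rcases hd : s.dropWhile PySem.Chars.isalpha with _ | ⟨c, r⟩
      · have hlen : tw.length = s.length := by
          conv_rhs => rw [← hsplit, hd]
          simp
        rw [if_pos hlen]
        simp [pvDispatch, hd]
      · have hlen : tw.length ≠ s.length := by
          conv_rhs => rw [← hsplit, hd]
          simp
        have hget : s[tw.length]? = some c := by
          conv_lhs => rw [← hsplit, hd]
          simp
        rw [if_neg hlen, hget]
        simp [pvDispatch, hd]
    · rw [if_neg hm, if_neg (show ¬ tw ∈ _ by simpa [pvColonKeywords] using hm)]
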